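-- pv_equiv track=rewrite | github.com/winniegithubrit/codility-solutions | job.py | solution
-- ===== SOURCE A (Python) =====
-- def solution(A, D):
--     transactions = {}
--     total_income = 0
--     total_expenses = 0
--
--     for amount, date in zip(A, D):
--         year, month, _ = date.split('-')
--         key = f"{year}-{month}"
--
--         if key not in transactions:
--             transactions[key] = 0
--
--         transactions[key] += amount
--
--         if amount >= 0:
--             total_income += amount
--         else:
--             total_expenses += amount
--
--     total_fee = 0
--     for amount in transactions.values():
--         if amount < -100:
--             total_fee += 5
--         elif amount < -15:
--             total_fee += 5
--         elif amount < -10: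
--             total_fee += 5
--         elif amount < -5:
--             total_fee += 5
--
--     final_balance = total_income + total_expenses - total_fee
--     return final_balance
-- ===== SOURCE B (Python) =====
-- def solution(A, D):
--     # result = sum of all amounts - 5 per month whose total is below -5
--     pairs = [(date.split('-')[0] + '-' + date.split('-')[1], amount)
--              for amount, date in zip(A, D)]
--     keys = []
--     for k, _ in pairs:
--         if k not in keys:
--             keys.append(k)
--     fee = 0
--     for k in keys:
--         if sum(a for kk, a in pairs if kk == k) < -5:
--             fee += 5
--     return sum(a for _, a in pairs) - fee
-- ===== Notes on version B (the rewrite author's own statement) =====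
-- stated objective: simpler
-- what changed: Replaces the dict hash-grouping, the separate income/expense accumulators and the four-branch fee cascade by: build (year-month, amount) pairs once, dedup the keys in first-occurrence order, and charge one flat 5-fee per key whose filtered sum is below -5, subtracted from one overall sum.
import Mathlib
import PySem

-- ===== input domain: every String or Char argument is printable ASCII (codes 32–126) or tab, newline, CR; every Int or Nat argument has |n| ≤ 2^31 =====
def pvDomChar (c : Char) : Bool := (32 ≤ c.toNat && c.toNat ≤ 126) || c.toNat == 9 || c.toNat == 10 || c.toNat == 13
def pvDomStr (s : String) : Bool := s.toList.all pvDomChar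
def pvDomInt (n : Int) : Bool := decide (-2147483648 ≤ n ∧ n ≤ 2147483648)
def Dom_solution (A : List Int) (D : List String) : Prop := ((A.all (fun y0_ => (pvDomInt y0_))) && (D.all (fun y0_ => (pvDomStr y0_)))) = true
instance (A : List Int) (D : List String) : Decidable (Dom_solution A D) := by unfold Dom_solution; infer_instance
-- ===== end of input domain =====

-- B replaces A's dict grouping + income/expense accumulators + four-branch fee cascade by
-- dedup'd month keys with a per-key filtered sum and one flat fee condition (objective: simpler).

-- shared helper: date.split('-')  (the sep "-" is nonempty, so split? is always `some`)
def pvParts (d : String) : List String := (PySem.Str.split? d "-").getD []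

-- ===== PORT A =====
-- `year, month, _ = date.split('-')`; the `_ => ""` branch is the unpacking ValueError,
-- excluded by Pre_solution.
def pvKeyA (d : String) : String :=
  match pvParts d with
  | [y, m, _] => y ++ "-" ++ m
  | _ => ""

-- loop body: state = (transactions, total_income, total_expenses)
def pvStepA (st : PySem.Dict String Int × Int × Int) (p : Int × String) :
    PySem.Dict String Int × Int × Int :=
  let key := pvKeyA p.2
  let t0 := if st.1.contains key then st.1 else st.1.insert key 0
  let t1 := t0.insert key (t0.getD key 0 + p.1)
  if p.1 ≥ 0 then (t1, st.2.1 + p.1, st.2.2) else (t1, st.2.1, st.2.2 + p.1)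

def pvFeeStepA (acc : Int) (v : Int) : Int :=
  if v < -100 then acc + 5
  else if v < -15 then acc + 5
  else if v < -10 then acc + 5
  else if v < -5 then acc + 5
  else acc

def solution (A : List Int) (D : List String) : Int :=
  let st := (A.zip D).foldl pvStepA (PySem.Dict.empty, 0, 0)
  let fee := st.1.values.foldl pvFeeStepA 0
  st.2.1 + st.2.2 - fee

-- ===== PORT B =====
-- `parts[0] + '-' + parts[1]`; `.getD ""` totalizes the IndexError region, excluded by Pre_solution.
def pvKeyB (d : String) : String :=
  ((PySem.List.pyGet? (pvParts d) 0).getD "") ++ "-" ++ ((PySem.List.pyGet? (pvParts d) 1).getD "")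

def solution_alt (A : List Int) (D : List String) : Int :=
  let pairs := (A.zip D).map (fun p => (pvKeyB p.2, p.1))
  let keys := pairs.foldl (fun s p => PySem.Set.add s p.1) ([] : List String)
  let fee := keys.foldl
    (fun acc k => if ((pairs.filter (fun q => q.1 == k)).map (·.2)).sum < -5 then acc + 5 else acc) 0
  (pairs.map (·.2)).sum - fee

-- ===== PRECONDITION & SPEC =====
-- Pre_: every zipped date splits on '-' into exactly 3 parts; elsewhere A raises a
-- ValueError unpacking `year, month, _` (this is exactly A's raising set).
def Pre_solution (A : List Int) (D : List String) : Prop :=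
  ∀ p ∈ A.zip D, (pvParts p.2).length = 3
instance (A : List Int) (D : List String) : Decidable (Pre_solution A D) := by
  unfold Pre_solution; infer_instance

def pvWitness_solution : List Int × List String :=
  ([100, -120, -5, -30], ["2023-01-03", "2023-01-15", "2023-02-10", "2023-02-20"])

def Spec_solution (A : List Int) (D : List String) (out : Int) : Prop := out = solution_alt A D
instance (A : List Int) (D : List String) (out : Int) : Decidable (Spec_solution A D out) := by
  unfold Spec_solution; infer_instance

-- ===== CLAIM (what is proved, stated in full; the proofs are below) =====
def Claim_equal_solution : Prop := ∀ (A : List Int) (D : List String),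
  Dom_solution A D → Pre_solution A D → Spec_solution A D (solution A D)

-- ===== LEMMAS AND PROOFS =====

-- the two key computations agree on well-formed dates
theorem pvKey_eq (d : String) (h : (pvParts d).length = 3) : pvKeyA d = pvKeyB d := by
  unfold pvKeyA pvKeyB
  match hp : pvParts d with
  | [y, m, z] => simp [PySem.List.pyGet?, PySem.List.pyIdx?]
  | [] | [_] | [_, _] | _ :: _ :: _ :: _ :: _ => simp [hp] at h

-- A's setdefault-then-add collapses to a single accumulating insert
theorem pvStepA_dict (t : PySem.Dict String Int) (k : String) (a : Int) :
    (let t0 := if t.contains k then t else t.insert k 0;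
     t0.insert k (t0.getD k 0 + a)) = t.insert k (t.getD k 0 + a) := by
  by_cases h : t.contains k = true
  · simp [h]
  · simp only [Bool.not_eq_true] at h
    simp [h, PySem.Dict.insert_insert_self, PySem.Dict.getD_insert_self,
      PySem.Dict.getD_of_not_contains t (0 : Int) h]

def pvIns (t : PySem.Dict String Int) (q : String × Int) : PySem.Dict String Int :=
  t.insert q.1 (t.getD q.1 0 + q.2)

-- componentwise characterisation of A's loop
theorem pvFoldA (l : List (Int × String)) (d : PySem.Dict String Int) (i e : Int) :
    (l.foldl pvStepA (d, i, e)).1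
      = (l.map (fun p => (pvKeyA p.2, p.1))).foldl pvIns d ∧
    (l.foldl pvStepA (d, i, e)).2.1 + (l.foldl pvStepA (d, i, e)).2.2
      = i + e + (l.map (·.1)).sum := by
  induction l generalizing d i e with
  | nil => simp
  | cons p rest ih =>
    have hd : pvStepA (d, i, e) p
        = (pvIns d (pvKeyA p.2, p.1),
           if p.1 ≥ 0 then (i + p.1, e) else (i, e + p.1)) := by
      unfold pvStepA pvIns
      have hcol := pvStepA_dict d (pvKeyA p.2) p.1
      dsimp only at hcol ⊢
      rw [hcol]
      split <;> rfl
    rw [List.foldl_cons, hd, List.map_cons, List.foldl_cons, List.map_cons]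
    by_cases h : p.1 ≥ 0
    · rw [if_pos h]
      obtain ⟨H1, H2⟩ := ih (pvIns d (pvKeyA p.2, p.1)) (i + p.1) e
      exact ⟨H1, by rw [H2]; simp; ring⟩
    · rw [if_neg h]
      obtain ⟨H1, H2⟩ := ih (pvIns d (pvKeyA p.2, p.1)) i (e + p.1)
      exact ⟨H1, by rw [H2]; simp; ring⟩

-- value of the accumulated dict at any key = filtered sum
theorem pvFoldIns_getD (l : List (String × Int)) (d : PySem.Dict String Int) (k : String) :
    ((l.foldl pvIns d).getD k 0)
      = d.getD k 0 + ((l.filter (fun q => q.1 == k)).map (·.2)).sum := by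
  induction l generalizing d with
  | nil => simp
  | cons q rest ih =>
    rw [List.foldl_cons, ih]
    by_cases h : q.1 = k
    · simp [pvIns, h, PySem.Dict.getD_insert_self]; ring
    · simp [pvIns, h, PySem.Dict.getD_insert, Ne.symm h]

theorem pvFoldIns_keys (l : List (String × Int)) :
    (l.foldl pvIns PySem.Dict.empty).keys = PySem.Set.ofList (l.map (·.1)) := by
  have := PySem.Dict.keys_foldl_insert_key l (fun q => q.1)
      (fun t q => t.getD q.1 0 + q.2) PySem.Dict.empty
  simpa [pvIns, PySem.Set.update_nil_left] using this

theorem pvFoldIns_nodup (l : List (String × Int)) :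
    (l.foldl pvIns PySem.Dict.empty).keys.Nodup := by
  have := PySem.Dict.nodup_keys_foldl_insert_key l (fun q => q.1)
      (fun t q => t.getD q.1 0 + q.2) PySem.Dict.empty (by simp)
  simpa [pvIns] using this

-- the four-branch cascade is one condition
theorem pvFeeStepA_eq (acc v : Int) : pvFeeStepA acc v = if v < -5 then acc + 5 else acc := by
  unfold pvFeeStepA; split_ifs <;> omega

-- ===== VERDICT (by name: the statement is the Claim_ definition above) =====
theorem solution_spec : Claim_equal_solution := by
  intro A D _ hpre
  unfold Spec_solution solution solution_alt
  dsimp only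
  -- the two pair lists coincide under Pre_
  have hkeys : (A.zip D).map (fun p => (pvKeyA p.2, p.1))
      = (A.zip D).map (fun p => (pvKeyB p.2, p.1)) := by
    apply List.map_congr_left
    intro p hp
    rw [pvKey_eq p.2 (hpre p hp)]
  obtain ⟨h1, h2⟩ := pvFoldA (A.zip D) PySem.Dict.empty 0 0
  rw [h1, h2, hkeys]
  set pairs := (A.zip D).map (fun p => (pvKeyB p.2, p.1)) with hpairs
  -- income + expenses = overall sum
  have hsum : ((A.zip D).map (·.1)).sum = (pairs.map (·.2)).sum := by
    rw [hpairs, List.map_map]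
    rfl
  -- B's key list = the dict's key list
  have hK : pairs.foldl (fun s p => PySem.Set.add s p.1) ([] : List String)
      = (pairs.foldl pvIns PySem.Dict.empty).keys := by
    rw [pvFoldIns_keys, ← PySem.Set.update_nil_left,
      PySem.Set.update_map_eq_foldl_add pairs (fun p => p.1) []]
  -- the fee folds agree
  have hstep : (fun (acc : Int) (k : String) =>
        pvFeeStepA acc ((pairs.foldl pvIns PySem.Dict.empty).getD k 0))
      = (fun acc k => if ((pairs.filter (fun q => q.1 == k)).map (·.2)).sum < -5
                      then acc + 5 else acc) := by
    funext acc k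
    rw [pvFeeStepA_eq, pvFoldIns_getD]
    simp
  have hfee : (pairs.foldl pvIns PySem.Dict.empty).values.foldl pvFeeStepA 0
      = (pairs.foldl (fun s p => PySem.Set.add s p.1) ([] : List String)).foldl
          (fun acc k => if ((pairs.filter (fun q => q.1 == k)).map (·.2)).sum < -5
                        then acc + 5 else acc) 0 := by
    rw [hK, PySem.Dict.values_eq_map_keys _ (pvFoldIns_nodup pairs) 0, List.foldl_map, hstep]
  rw [hsum, hfee]
  ring
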